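-- pv_equiv track=rewrite | github.com/ronaldjuarez/garage | interview_questions/prog008.py | countPerm
-- ===== SOURCE A (Python) =====
-- def countPerm(a,b):
--     count = 0
--     for i in range(len(b)):
--         if b[i] in a and i + 3 < len(b):
--             temp = sorted(b[i:i+4])
--             if temp == sorted(a):
--                 count += 1
--
--     return count
-- ===== SOURCE B (Python) =====
-- def countPerm(a, b):
--     if len(b) < 4:
--         return 0
--     target = {}
--     for x in a:
--         target[x] = target.get(x, 0) + 1
--     window = {}
--     for x in b[:4]:
--         window[x] = window.get(x, 0) + 1
--     count = 0
--     for i in range(len(b) - 3):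
--         if window == target:
--             count += 1
--         if i + 4 < len(b):
--             x = b[i]
--             if window[x] == 1:
--                 del window[x]
--             else:
--                 window[x] = window[x] - 1
--             y = b[i + 4]
--             window[y] = window.get(y, 0) + 1
--     return count
-- ===== Notes on version B (the rewrite author's own statement) =====
-- stated objective: alternative
-- what changed: Instead of sorting every length-4 slice of b and comparing with sorted(a) (with a redundant 'b[i] in a' guard), B builds a count dict of a once and slides a rolling count dict across b, removing the outgoing element (deleting zero-count keys) and adding the incoming one, comparing dicts at each window start.
import Mathlib
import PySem

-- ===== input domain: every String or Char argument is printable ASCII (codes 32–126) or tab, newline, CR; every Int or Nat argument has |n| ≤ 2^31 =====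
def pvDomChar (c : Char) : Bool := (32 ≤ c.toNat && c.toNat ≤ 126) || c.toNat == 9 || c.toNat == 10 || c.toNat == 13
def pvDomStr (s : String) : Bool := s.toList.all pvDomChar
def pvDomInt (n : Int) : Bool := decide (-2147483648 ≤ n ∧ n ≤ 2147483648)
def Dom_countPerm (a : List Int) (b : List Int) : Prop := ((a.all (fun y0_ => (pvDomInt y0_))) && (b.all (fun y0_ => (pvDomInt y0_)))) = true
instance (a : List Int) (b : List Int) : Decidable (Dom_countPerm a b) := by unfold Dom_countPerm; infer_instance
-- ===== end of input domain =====

-- B replaces A's per-index sort of every window by a single sorted target multiset kept as a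
-- dict of counts and a rolling window dict updated incrementally while sliding (objective: alternative).

-- ===== PORT A =====
def countPerm (a : List Int) (b : List Int) : Int :=
  (PySem.List.pyRange 0 (b.length : Int) 1).foldl
    (fun count i =>
      if PySem.List.pyGetD b i 0 ∈ a ∧ i + 3 < (b.length : Int) then
        (if PySem.List.sorted (PySem.List.slice b (some i) (some (i + 4))) (fun x => x) false
            = PySem.List.sorted a (fun x => x) false
         then count + 1 else count)
      else count) 0

-- ===== PORT B =====
-- Python's dict `==` (insertion-order-blind): same number of entries and every key of d maps
-- to the same value in e.  Exact for dicts (unique keys by construction).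
def pvDictEq (d e : PySem.Dict Int Int) : Bool :=
  d.items.length == e.items.length && d.items.all (fun kv => e.get? kv.1 == some kv.2)

def countPerm_alt (a : List Int) (b : List Int) : Int :=
  if (b.length : Int) < 4 then 0
  else
    let target := a.foldl (fun d x => d.insert x (d.getD x 0 + 1)) PySem.Dict.empty
    let window0 := (PySem.List.slice b none (some 4)).foldl
      (fun d x => d.insert x (d.getD x 0 + 1)) PySem.Dict.empty
    let r := (PySem.List.pyRange 0 ((b.length : Int) - 3) 1).foldl
      (fun st i =>
        let count := if pvDictEq st.2 target then st.1 + 1 else st.1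
        let window :=
          if i + 4 < (b.length : Int) then
            -- Python reads window[x]; x = b[i] is always a key of the window dict here,
            -- so the total getD read is exact.
            let x := PySem.List.pyGetD b i 0
            let w := if st.2.getD x 0 == 1 then st.2.erase x
                     else st.2.insert x (st.2.getD x 0 - 1)
            let y := PySem.List.pyGetD b (i + 4) 0
            w.insert y (w.getD y 0 + 1)
          else st.2
        (count, window)) ((0 : Int), window0)
    r.1

-- ===== PRECONDITION & SPEC =====
def Spec_countPerm (a : List Int) (b : List Int) (out : Int) : Prop := out = countPerm_alt a b
instance (a : List Int) (b : List Int) (out : Int) : Decidable (Spec_countPerm a b out) := by unfold Spec_countPerm; infer_instance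

-- ===== CLAIM (what is proved, stated in full; the proofs are below) =====
def Claim_equal_countPerm : Prop := ∀ (a : List Int) (b : List Int), Dom_countPerm a b → Spec_countPerm a b (countPerm a b)

-- ===== LEMMAS AND PROOFS =====

def GoodFor (d : PySem.Dict Int Int) (xs : List Int) : Prop :=
  d.keys.Nodup ∧ (∀ kv ∈ d.items, kv.2 ≠ 0) ∧ (∀ k, d.getD k 0 = (xs.count k : Int))

theorem good_counter (xs : List Int) : GoodFor (PySem.Dict.counter xs) xs := by
  refine ⟨PySem.Dict.nodup_keys_counter xs, ?_, fun k => PySem.Dict.getD_counter xs k⟩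
  intro kv hkv
  rw [PySem.Dict.items_counter] at hkv
  obtain ⟨k, hk, rfl⟩ := List.mem_map.mp hkv
  have h1 : k ∈ xs := (PySem.Set.mem_ofList xs k).mp hk
  have h2 : 0 < xs.count k := List.count_pos_iff.mpr h1
  simp only [ne_eq]
  exact_mod_cast Nat.pos_iff_ne_zero.mp h2

theorem good_mem_keys {d : PySem.Dict Int Int} {xs : List Int} (h : GoodFor d xs) (k : Int) :
    k ∈ d.keys ↔ d.getD k 0 ≠ 0 := by
  obtain ⟨hnd, hnz, _⟩ := h
  constructor
  · intro hk
    obtain ⟨⟨k', v⟩, hm, hk'⟩ := List.mem_map.mp hk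
    dsimp at hk'; subst hk'
    rw [PySem.Dict.getD_of_mem_items d hm hnd 0]
    exact hnz _ hm
  · intro hne
    by_contra hk
    have : d.get? k = none := (PySem.Dict.get?_eq_none_iff_not_mem_keys d k).mpr hk
    rw [PySem.Dict.getD_eq_get?_getD, this] at hne
    exact hne rfl

theorem dictEq_iff {d e : PySem.Dict Int Int} {xs ys : List Int}
    (hd : GoodFor d xs) (he : GoodFor e ys) :
    pvDictEq d e = true ↔ xs.Perm ys := by
  rw [pvDictEq, Bool.and_eq_true, beq_iff_eq, List.all_eq_true, List.perm_iff_count]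
  obtain ⟨hdn, hdz, hdc⟩ := hd
  obtain ⟨hen, hez, hec⟩ := he
  constructor
  · rintro ⟨hlen, hget⟩ k
    have hsub : d.keys ⊆ e.keys := by
      intro k' hk'
      obtain ⟨⟨k'', v⟩, hm, hk''⟩ := List.mem_map.mp hk'
      dsimp at hk''
      rw [hk''] at hm
      have := (beq_iff_eq).mp (hget _ hm)
      by_contra hne
      rw [(PySem.Dict.get?_eq_none_iff_not_mem_keys e _).mpr hne] at this
      simp at this
    have hperm : d.keys.Perm e.keys := by
      refine (List.subperm_of_subset hdn hsub).perm_of_length_le ?_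
      simp only [PySem.Dict.keys, List.length_map]
      omega
    by_cases hk : k ∈ d.keys
    · obtain ⟨⟨k', v⟩, hm, hk'⟩ := List.mem_map.mp hk
      dsimp at hk'
      rw [hk'] at hm
      have h1 := PySem.Dict.getD_of_mem_items d hm hdn 0
      have h2 : e.get? k = some v := (beq_iff_eq).mp (hget _ hm)
      have h3 : e.getD k 0 = v := by rw [PySem.Dict.getD_eq_get?_getD, h2]; rfl
      have := hdc k; have := hec k
      omega
    · have hk2 : k ∉ e.keys := fun hke => hk (hperm.mem_iff.mpr hke)
      have h1 : d.getD k 0 = 0 := by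
        by_contra hne; exact hk ((good_mem_keys ⟨hdn, hdz, hdc⟩ k).mpr hne)
      have h2 : e.getD k 0 = 0 := by
        by_contra hne; exact hk2 ((good_mem_keys ⟨hen, hez, hec⟩ k).mpr hne)
      have := hdc k; have := hec k
      omega
  · intro hcnt
    have hgd : ∀ k, d.getD k 0 = e.getD k 0 := by
      intro k; rw [hdc, hec, hcnt]
    constructor
    · have : d.keys.Perm e.keys := by
        rw [List.perm_ext_iff_of_nodup hdn hen]
        intro k
        rw [good_mem_keys ⟨hdn, hdz, hdc⟩ k, good_mem_keys ⟨hen, hez, hec⟩ k, hgd]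
      simpa only [PySem.Dict.keys, List.length_map] using this.length_eq
    · rintro ⟨k, v⟩ hm
      rw [beq_iff_eq]
      have h1 := PySem.Dict.getD_of_mem_items d hm hdn 0
      have hv : v ≠ 0 := hdz _ hm
      have h2 : e.getD k 0 = v := by rw [← hgd, h1]
      rw [PySem.Dict.getD_eq_get?_getD] at h2
      cases hg : e.get? k with
      | none => rw [hg] at h2; exact absurd h2.symm hv
      | some w => rw [hg] at h2; simp at h2; simpa using h2







theorem find?_filter_ne (x k : Int) (hne : k ≠ x) (l : List (Int × Int)) :
    (l.filter (fun p => !(p.1 == x))).find? (fun p => p.1 == k)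
      = l.find? (fun p => p.1 == k) := by
  induction l with
  | nil => rfl
  | cons hd tl ih =>
    by_cases hx : hd.1 = x
    · have h1 : (!(hd.1 == x)) = false := by simp [hx]
      have h2 : (hd.1 == k) = false := by simp [hx]; omega
      simp [h1, h2, ih]
    · have h1 : (!(hd.1 == x)) = true := by simp [hx]
      simp only [List.filter_cons, h1, List.find?_cons]
      by_cases hk : hd.1 = k
      · simp [hk]
      · have h2 : (hd.1 == k) = false := by simp [hk]
        simp [h2, ih]

theorem get?_erase_self (d : PySem.Dict Int Int) (x : Int) :
    (d.erase x).get? x = none := by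
  show Option.map _ (List.find? _ (List.filter _ d.items)) = none
  rw [List.find?_eq_none.mpr]
  · rfl
  · intro p hp
    have := (List.mem_filter.mp hp).2
    simpa using this

theorem get?_erase_ne (d : PySem.Dict Int Int) (x k : Int) (hne : k ≠ x) :
    (d.erase x).get? k = d.get? k := by
  show Option.map _ (List.find? _ (List.filter _ d.items)) = _
  rw [find?_filter_ne x k hne]
  rfl

theorem nodup_keys_erase (d : PySem.Dict Int Int) (x : Int) (h : d.keys.Nodup) :
    (d.erase x).keys.Nodup := by
  have hsub : (d.erase x).items.Sublist d.items := List.filter_sublist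
  exact (hsub.map Prod.fst).nodup h

theorem good_remove {d : PySem.Dict Int Int} {x : Int} {w : List Int}
    (h : GoodFor d (x :: w)) :
    GoodFor (if d.getD x 0 == 1 then d.erase x else d.insert x (d.getD x 0 - 1)) w := by
  obtain ⟨hnd, hnz, hc⟩ := h
  have hx := hc x
  rw [List.count_cons_self] at hx
  by_cases h1 : d.getD x 0 = 1
  · have hw : (w.count x : Int) = 0 := by omega
    rw [if_pos (by simpa using h1)]
    refine ⟨nodup_keys_erase d x hnd, ?_, ?_⟩
    · intro kv hkv
      exact hnz kv (List.mem_of_mem_filter hkv)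
    · intro k
      by_cases hk : k = x
      · subst hk
        rw [PySem.Dict.getD_eq_get?_getD, get?_erase_self]
        exact (by simpa using hw.symm)
      · rw [PySem.Dict.getD_eq_get?_getD, get?_erase_ne d x k hk,
            ← PySem.Dict.getD_eq_get?_getD, hc k]
        have : (x :: w).count k = w.count k := by simp [List.count_cons]; omega
        rw [this]
  · rw [if_neg (by simpa using h1)]
    refine ⟨PySem.Dict.nodup_keys_insert d x _ hnd, ?_, ?_⟩
    · intro kv hkv
      rcases (PySem.Dict.mem_items_insert d x _ kv).mp hkv with hkv | hkv
      · subst hkv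
        have hxk : 0 < (x :: w).count x := List.count_pos_iff.mpr (by simp)
        simp only [ne_eq]
        omega
      · exact hnz kv hkv.1
    · intro k
      rw [PySem.Dict.getD_insert]
      by_cases hk : k = x
      · subst hk; rw [if_pos rfl]; omega
      · rw [if_neg hk, hc k]
        have : (x :: w).count k = w.count k := by simp [List.count_cons]; omega
        rw [this]

theorem good_add {d : PySem.Dict Int Int} {w : List Int} (h : GoodFor d w) (y : Int) :
    GoodFor (d.insert y (d.getD y 0 + 1)) (w ++ [y]) := by
  obtain ⟨hnd, hnz, hc⟩ := h
  refine ⟨PySem.Dict.nodup_keys_insert d y _ hnd, ?_, ?_⟩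
  · intro kv hkv
    rcases (PySem.Dict.mem_items_insert d y _ kv).mp hkv with hkv | hkv
    · subst hkv
      have := hc y
      simp only [ne_eq]
      omega
    · exact hnz kv hkv.1
  · intro k
    rw [PySem.Dict.getD_insert]
    by_cases hk : k = y
    · subst hk
      rw [if_pos rfl, hc k]
      have : (w ++ [k]).count k = w.count k + 1 := by simp
      rw [this]; push_cast; ring
    · rw [if_neg hk, hc k]
      have : (w ++ [y]).count k = w.count k := by simp [List.count_singleton]; omega
      rw [this]

-- B's sliding-window step, at counter-normalised target (proof helper)
def loopStepI (a b : List Int) (st : Int × PySem.Dict Int Int) (i : Int) :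
    Int × PySem.Dict Int Int :=
  let count := if pvDictEq st.2 (PySem.Dict.counter a) then st.1 + 1 else st.1
  let window :=
    if i + 4 < (b.length : Int) then
      let x := PySem.List.pyGetD b i 0
      let w := if st.2.getD x 0 == 1 then st.2.erase x
               else st.2.insert x (st.2.getD x 0 - 1)
      let y := PySem.List.pyGetD b (i + 4) 0
      w.insert y (w.getD y 0 + 1)
    else st.2
  (count, window)

theorem loop_inv (a b : List Int) (hb : 4 ≤ b.length) (m : Nat) (hm : m ≤ b.length - 3) :
    ∃ d : PySem.Dict Int Int,
      ((List.range m).map (fun (k : Nat) => (k : Int))).foldl (loopStepI a b)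
        ((0 : Int), PySem.Dict.counter (b.take 4))
      = (((List.range m).countP (fun j => decide (((b.drop j).take 4).Perm a)) : Int), d)
      ∧ GoodFor d ((b.drop (min m (b.length - 4))).take 4) := by
  induction m with
  | zero =>
    refine ⟨PySem.Dict.counter (b.take 4), by simp, ?_⟩
    simpa using good_counter (b.take 4)
  | succ m ih =>
    have hm' : m ≤ b.length - 3 := by omega
    have hm4 : m ≤ b.length - 4 := by omega
    obtain ⟨d, hfold, hgood⟩ := ih hm'
    rw [Nat.min_eq_left hm4] at hgood
    rw [List.range_succ, List.map_append, List.foldl_append, hfold]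
    have hmn : m < b.length := by omega
    -- count component
    have hcnt : (if pvDictEq d (PySem.Dict.counter a) then
          (((List.range m).countP (fun j => decide (((b.drop j).take 4).Perm a))) : Int) + 1
        else (((List.range m).countP (fun j => decide (((b.drop j).take 4).Perm a))) : Int))
        = (((List.range m ++ [m]).countP (fun j => decide (((b.drop j).take 4).Perm a))) : Int) := by
      rw [List.countP_append]
      by_cases hp : ((b.drop m).take 4).Perm a
      · rw [if_pos ((dictEq_iff hgood (good_counter a)).mpr hp)]
        simp [hp]
      · rw [if_neg (fun hq => hp ((dictEq_iff hgood (good_counter a)).mp hq))]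
        simp [hp]
    by_cases hc : m + 4 < b.length
    · have hcI : ((m : Int)) + 4 < (b.length : Int) := by exact_mod_cast hc
      have hx : PySem.List.pyGetD b (m : Int) 0 = b[m] := by
        rw [PySem.List.pyGetD_natCast, List.getD_eq_getElem _ _ hmn]
      have hy : PySem.List.pyGetD b ((m : Int) + 4) 0 = b[m+4] := by
        have : ((m : Int)) + 4 = ((m + 4 : Nat) : Int) := by push_cast; ring
        rw [this, PySem.List.pyGetD_natCast, List.getD_eq_getElem _ _ (by omega)]
      have hW : (b.drop m).take 4 = b[m] :: (b.drop (m+1)).take 3 := by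
        rw [List.drop_eq_getElem_cons hmn, show (4:Nat) = 3+1 from rfl,
            List.take_succ_cons]
      have h3 : 3 < (b.drop (m+1)).length := by simp; omega
      have hg3 : (b.drop (m+1))[3] = b[m+4] := by
        simp [List.getElem_drop, show m+1+3 = m+4 from by omega]
      have hW'' : (b.drop (m+1)).take 4 = (b.drop (m+1)).take 3 ++ [(b.drop (m+1))[3]] := by
        rw [show (4:Nat) = 3+1 from rfl, List.take_add_one, List.getElem?_eq_getElem h3]
        rfl
      have hW' : (b.drop (m+1)).take 3 ++ [b[m+4]] = (b.drop (m+1)).take 4 := by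
        rw [hW'', hg3]
      rw [hW] at hgood
      refine ⟨((if d.getD b[m] 0 == 1 then d.erase b[m]
                else d.insert b[m] (d.getD b[m] 0 - 1)).insert b[m+4]
                ((if d.getD b[m] 0 == 1 then d.erase b[m]
                  else d.insert b[m] (d.getD b[m] 0 - 1)).getD b[m+4] 0 + 1)), ?_, ?_⟩
      · simp only [List.map_cons, List.map_nil, List.foldl_cons, List.foldl_nil]
        unfold loopStepI
        dsimp only
        rw [hcnt, if_pos hcI, hx, hy]
      · have h1 := good_remove hgood
        have h2 := good_add h1 (b[m+4])
        rw [hW'] at h2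
        rw [Nat.min_eq_left (by omega)]
        exact h2
    · have hcI : ¬ (((m : Int)) + 4 < (b.length : Int)) := by
        intro h; exact hc (by exact_mod_cast h)
      have hme : m = b.length - 4 := by omega
      refine ⟨d, ?_, ?_⟩
      · simp only [List.map_cons, List.map_nil, List.foldl_cons, List.foldl_nil]
        unfold loopStepI
        dsimp only
        rw [hcnt, if_neg hcI]
      · rw [Nat.min_eq_right (by omega)]
        rw [hme] at hgood
        exact hgood

theorem countA_fold (a b : List Int) (m : Nat) (hm : m ≤ b.length) :
    (List.range m).foldl (fun count (j : Nat) =>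
      if PySem.List.pyGetD b (j : Int) 0 ∈ a ∧ (j : Int) + 3 < (b.length : Int) then
        (if PySem.List.sorted (PySem.List.slice b (some (j : Int)) (some ((j : Int) + 4))) (fun x => x) false
            = PySem.List.sorted a (fun x => x) false
         then count + 1 else count)
      else count) 0
    = ((List.range m).countP (fun j => decide (j + 3 < b.length ∧ ((b.drop j).take 4).Perm a)) : Int) := by
  induction m with
  | zero => simp
  | succ m ih =>
    have hm' : m ≤ b.length := by omega
    have hmn : m < b.length := by omega
    rw [List.range_succ, List.foldl_append, ih hm', List.countP_append,
        List.foldl_cons, List.foldl_nil, List.countP_cons, List.countP_nil]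
    have hslice : PySem.List.slice b (some (m : Int)) (some ((m : Int) + 4))
        = (b.drop m).take 4 := by
      have := PySem.List.slice_natCast_add b m 4
      simpa using this
    have hx : PySem.List.pyGetD b (m : Int) 0 = b[m] := by
      rw [PySem.List.pyGetD_natCast, List.getD_eq_getElem _ _ hmn]
    by_cases h3 : m + 3 < b.length
    · have h3I : ((m : Int)) + 3 < (b.length : Int) := by exact_mod_cast h3
      by_cases hp : ((b.drop m).take 4).Perm a
      · have hmem : b[m] ∈ a := by
          refine hp.mem_iff.mp ?_
          rw [List.drop_eq_getElem_cons hmn, show (4:Nat) = 3+1 from rfl,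
              List.take_succ_cons]
          exact List.mem_cons_self
        rw [if_pos ⟨by rw [hx]; exact hmem, h3I⟩,
            if_pos (by rw [hslice]; exact (PySem.List.sorted_id_eq_sorted_id_iff_perm _ _).mpr hp)]
        simp [h3, hp]
      · have hs : ¬ (PySem.List.sorted (PySem.List.slice b (some (m : Int)) (some ((m : Int) + 4))) (fun x => x) false
            = PySem.List.sorted a (fun x => x) false) := by
          rw [hslice]
          intro hq
          exact hp ((PySem.List.sorted_id_eq_sorted_id_iff_perm _ _).mp hq)
        by_cases hmem : PySem.List.pyGetD b (m : Int) 0 ∈ a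
        · rw [if_pos ⟨hmem, h3I⟩, if_neg hs]
          simp [hp]
        · rw [if_neg (fun hq => hmem hq.1)]
          simp [hp]
    · have h3I : ¬ (((m : Int)) + 3 < (b.length : Int)) := by
        intro h; exact h3 (by exact_mod_cast h)
      rw [if_neg (fun hq => h3I hq.2)]
      simp [h3]

theorem countP_shift (n : Nat) (P : Nat → Prop) [DecidablePred P] :
    (List.range n).countP (fun j => decide (j + 3 < n ∧ P j))
      = (List.range (n - 3)).countP (fun j => decide (P j)) := by
  by_cases hn : n ≤ 3
  · rw [List.countP_eq_zero.mpr, show n - 3 = 0 from by omega]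
    · simp
    · intro j hj
      have := List.mem_range.mp hj
      simp only [decide_eq_true_eq, not_and]
      intro h; omega
  · obtain ⟨k, rfl⟩ : ∃ k, n = k + 3 := ⟨n - 3, by omega⟩
    rw [List.range_add, List.countP_append, Nat.add_sub_cancel]
    have h1 : (List.range k).countP (fun j => decide (j + 3 < k + 3 ∧ P j))
        = (List.range k).countP (fun j => decide (P j)) := by
      apply List.countP_congr
      intro j hj
      have := List.mem_range.mp hj
      simp only [decide_eq_true_eq]
      constructor
      · exact fun h => h.2
      · exact fun h => ⟨by omega, h⟩
    have h2 : ((List.range 3).map (fun x => k + x)).countP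
        (fun j => decide (j + 3 < k + 3 ∧ P j)) = 0 := by
      apply List.countP_eq_zero.mpr
      intro j hj
      obtain ⟨x, _, rfl⟩ := List.mem_map.mp hj
      simp only [decide_eq_true_eq, not_and]
      intro h; omega
    rw [h1, h2]; omega

theorem countPerm_eq_countP (a b : List Int) :
    countPerm a b
      = ((List.range (b.length - 3)).countP
          (fun j => decide (((b.drop j).take 4).Perm a)) : Int) := by
  unfold countPerm
  rw [PySem.List.pyRange_zero_natCast, List.foldl_map,
      countA_fold a b b.length le_rfl,
      countP_shift b.length (fun j => ((b.drop j).take 4).Perm a)]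

-- ===== VERDICT (by name: the statement is the Claim_ definition above) =====
theorem countPerm_spec : Claim_equal_countPerm := by
  intro a b _
  show countPerm a b = countPerm_alt a b
  rw [countPerm_eq_countP]
  by_cases hb : (b.length : Int) < 4
  · unfold countPerm_alt
    rw [if_pos hb, show b.length - 3 = 0 from by omega]
    simp
  · have hb4 : 4 ≤ b.length := by omega
    have hsl : PySem.List.slice b none (some 4) = b.take 4 := by
      rw [PySem.List.slice_to b (by norm_num : (0:Int) ≤ (4:Int))]
      rfl
    have hcast : ((b.length : Int) - 3) = ((b.length - 3 : Nat) : Int) := by omega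
    unfold countPerm_alt
    rw [if_neg hb, hsl, hcast, PySem.List.pyRange_zero_natCast]
    obtain ⟨d, hfold, -⟩ := loop_inv a b hb4 (b.length - 3) le_rfl
    exact (congrArg Prod.fst hfold).symm
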